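-- pv_equiv track=rewrite | github.com/yamaton/CodeForces | problemSet/327A-Flipping_Game.py | solve_
-- ===== SOURCE A (Python) =====
-- import itertools
-- import collections
--
-- def solve_(xs):
--     "O(N^2) solution"
--     n = len(xs)
--     assert n > 0
--     a = [1 if x == 0 else -1 for x in xs]
--     b = collections.defaultdict(int)
--     for i, acc in enumerate(itertools.accumulate(a)):
--         b[i] = acc
--     deltaS = max(b[j] - b[i] for i in range(-1, n) for j in range(i+1, n))
--     if deltaS <= 0:
--         return sum(xs) - 1
--     else:
--         return sum(xs) + deltaS
-- ===== SOURCE B (Python) =====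
-- def solve_(xs):
--     "O(N) Kadane's maximum-subarray on the +/-1 transformed array"
--     assert len(xs) > 0
--     v0 = 1 if xs[0] == 0 else -1
--     total = xs[0]
--     cur = v0
--     best = v0
--     for x in xs[1:]:
--         v = 1 if x == 0 else -1
--         total += x
--         cur = v if cur < 0 else cur + v
--         best = cur if best < cur else best
--     return total - 1 if best <= 0 else total + best
-- ===== Notes on version B (the rewrite author's own statement) =====
-- stated objective: faster
-- what changed: Replaces the O(N^2) maximum over all prefix-sum pairs (built via a defaultdict of accumulated sums) with a single-pass Kadane maximum-subarray scan on the +/-1 transformed values.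
import Mathlib
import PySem

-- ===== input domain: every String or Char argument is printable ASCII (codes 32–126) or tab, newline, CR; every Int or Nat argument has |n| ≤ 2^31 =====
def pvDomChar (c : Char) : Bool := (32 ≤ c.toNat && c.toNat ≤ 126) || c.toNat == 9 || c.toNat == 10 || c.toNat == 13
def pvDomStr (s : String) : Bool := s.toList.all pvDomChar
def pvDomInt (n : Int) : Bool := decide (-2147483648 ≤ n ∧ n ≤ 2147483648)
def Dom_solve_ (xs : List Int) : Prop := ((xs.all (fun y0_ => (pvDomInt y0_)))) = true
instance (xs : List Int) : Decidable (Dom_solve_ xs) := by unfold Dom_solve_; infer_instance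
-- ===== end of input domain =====

-- B replaces A's O(N^2) maximum over all prefix-sum pairs with a one-pass Kadane scan.

-- ===== PORT A =====
def solve_ (xs : List Int) : Int :=
  let n : Int := (xs.length : Int)
  -- assert n > 0: AssertionError on the empty list is excluded by Pre_solve_
  let a : List Int := xs.map (fun x => if x = 0 then (1 : Int) else -1)
  -- itertools.accumulate(a), ported by hand (exact: running prefix sums, left to right)
  let accs : List Int := (a.foldl (fun (st : Int × List Int) v => (st.1 + v, st.2 ++ [st.1 + v])) (0, [])).2
  -- b = defaultdict(int); b[i] = acc  (reads of missing keys default to 0)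
  let b : PySem.Dict Int Int := (PySem.List.enumerate accs).foldl (fun d p => d.insert p.1 p.2) PySem.Dict.empty
  let diffs : List Int := (PySem.List.pyRange (-1) n 1).foldl
      (fun acc i => acc ++ (PySem.List.pyRange (i + 1) n 1).map (fun j => b.getD j 0 - b.getD i 0)) []
  match PySem.List.max? diffs (fun z => z) with
  | none => 0   -- max() on an empty generator: unreachable under Pre_solve_
  | some deltaS => if deltaS ≤ 0 then xs.sum - 1 else xs.sum + deltaS

-- ===== PORT B =====
-- loop body of B's single Kadane pass (v = ±1 transform, running total / cur / best)
def pvStep (st : Int × Int × Int) (y : Int) : Int × Int × Int :=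
  let v : Int := if y = 0 then (1 : Int) else -1
  let cur : Int := if st.2.1 < 0 then v else st.2.1 + v
  let best : Int := if st.2.2 < cur then cur else st.2.2
  (st.1 + y, cur, best)

def solve__alt (xs : List Int) : Int :=
  match xs with
  | [] => 0   -- assert fails: excluded by Pre_solve_
  | x :: rest =>
    let v0 : Int := if x = 0 then (1 : Int) else -1
    let st := rest.foldl pvStep (x, v0, v0)
    if st.2.2 ≤ 0 then st.1 - 1 else st.1 + st.2.2

-- ===== PRECONDITION & SPEC =====
-- A asserts n > 0 (AssertionError on the empty list), so the empty list is excluded.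
def Pre_solve_ (xs : List Int) : Prop := xs ≠ []
instance (xs : List Int) : Decidable (Pre_solve_ xs) := by unfold Pre_solve_; infer_instance
def pvWitness_solve_ : List Int := [1, 0, 0, 1, 0]

def Spec_solve_ (xs : List Int) (out : Int) : Prop := out = solve__alt xs
instance (xs : List Int) (out : Int) : Decidable (Spec_solve_ xs out) := by unfold Spec_solve_; infer_instance

-- ===== CLAIM (what is proved, stated in full; the proofs are below) =====
def Claim_equal_solve_ : Prop := ∀ (xs : List Int), Dom_solve_ xs → Pre_solve_ xs → Spec_solve_ xs (solve_ xs)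

-- ===== LEMMAS AND PROOFS =====

-- the ±1 transform and prefix sums
def pvF (x : Int) : Int := if x = 0 then 1 else -1
def pvPre (p : List Int) (k : Nat) : Int := (p.take k).sum

-- names for A's intermediate values (definitionally equal to the port's let-bound values)
def pvA (xs : List Int) : List Int := xs.map (fun x => if x = 0 then (1 : Int) else -1)
def pvAccs (xs : List Int) : List Int :=
  ((pvA xs).foldl (fun (st : Int × List Int) v => (st.1 + v, st.2 ++ [st.1 + v])) (0, [])).2
def pvDict (xs : List Int) : PySem.Dict Int Int :=
  (PySem.List.enumerate (pvAccs xs)).foldl (fun d p => d.insert p.1 p.2) PySem.Dict.empty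
def pvDiffs (xs : List Int) : List Int :=
  (PySem.List.pyRange (-1) (xs.length : Int) 1).foldl
    (fun acc i => acc ++ (PySem.List.pyRange (i + 1) (xs.length : Int) 1).map
      (fun j => (pvDict xs).getD j 0 - (pvDict xs).getD i 0)) []
def Qx (xs : List Int) (i : Int) : Int := pvPre (pvA xs) (i + 1).toNat

-- B's (cur, best) Kadane step on an already-transformed value
def kstep (cb : Int × Int) (v : Int) : Int × Int :=
  (if cb.1 < 0 then v else cb.1 + v,
   if cb.2 < (if cb.1 < 0 then v else cb.1 + v) then (if cb.1 < 0 then v else cb.1 + v) else cb.2)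

-- "c is the maximum sum of a nonempty suffix of p"
def EndB (p : List Int) (c : Int) : Prop :=
  (∃ k : Nat, k < p.length ∧ c = p.sum - pvPre p k) ∧
  (∀ k : Nat, k < p.length → p.sum - pvPre p k ≤ c)

-- "m is the maximum sum of a nonempty contiguous segment of p"
def SegB (p : List Int) (m : Int) : Prop :=
  (∃ i j : Nat, i < j ∧ j ≤ p.length ∧ m = pvPre p j - pvPre p i) ∧
  (∀ i j : Nat, i < j → j ≤ p.length → pvPre p j - pvPre p i ≤ m)

lemma pvPre_len (p : List Int) : pvPre p p.length = p.sum := by simp [pvPre]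

lemma pvPre_append (p q : List Int) (j : Nat) (h : j ≤ p.length) :
    pvPre (p ++ q) j = pvPre p j := by
  simp [pvPre, List.take_append_of_le_length h]

lemma accFold : ∀ (l : List Int) (s : Int) (acc : List Int),
    l.foldl (fun (st : Int × List Int) v => (st.1 + v, st.2 ++ [st.1 + v])) (s, acc)
      = (s + l.sum, acc ++ (List.range l.length).map (fun k => s + pvPre l (k + 1))) := by
  intro l
  induction l with
  | nil => intro s acc; simp
  | cons v t ih =>
    intro s acc
    simp only [List.foldl_cons]
    rw [ih (s + v) (acc ++ [s + v])]
    refine Prod.ext ?_ ?_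
    · simp; ring
    · simp only [List.length_cons, List.range_succ_eq_map, List.map_cons, List.map_map]
      rw [List.append_assoc, List.singleton_append]
      congr 1
      congr 1
      · simp [pvPre]
      · apply List.map_congr_left
        intro k _
        simp [Function.comp, pvPre, List.take_succ_cons]
        ring
    
lemma accs_eq (xs : List Int) :
    pvAccs xs = (List.range (pvA xs).length).map (fun k => pvPre (pvA xs) (k + 1)) := by
  unfold pvAccs
  rw [accFold]
  simp

lemma accs_len (xs : List Int) : (pvAccs xs).length = xs.length := by
  rw [accs_eq]; simp [pvA]

lemma mem_enum {α : Type} : ∀ (l : List α) (s : Int) (k : Nat) (h : k < l.length),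
    ((s + (k : Int), l[k]) ∈ PySem.List.enumerate l s) := by
  intro l
  induction l with
  | nil => intro s k h; simp at h
  | cons z t ih =>
    intro s k h
    rw [PySem.List.enumerate_cons]
    cases k with
    | zero => simp
    | succ k' =>
      apply List.mem_cons_of_mem
      have hmem := ih (s + 1) k' (by simpa using h)
      have he : s + ((k' : Int) + 1) = s + 1 + (k' : Int) := by ring
      simpa [he] using hmem

lemma dict_items (xs : List Int) :
    (pvDict xs).items = PySem.List.enumerate (pvAccs xs) := by
  unfold pvDict
  have h1 : ∀ p ∈ PySem.List.enumerate (pvAccs xs),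
      (PySem.Dict.empty : PySem.Dict Int Int).contains p.1 = false := by
    intro p _
    simp [pysem]
  have h2 : (List.map (fun x : Int × Int => x.1) (PySem.List.enumerate (pvAccs xs) 0)).Nodup := by
    rw [PySem.List.map_fst_enumerate]
    exact PySem.List.nodup_pyRange_one _ _
  refine Eq.trans (PySem.Dict.items_foldl_insert_fresh _ (fun x : Int × Int => x.1) (fun x : Int × Int => x.2) _ h1 h2) ?_
  simp
  rfl

lemma dict_keys (xs : List Int) :
    (pvDict xs).keys = PySem.List.pyRange 0 ((pvAccs xs).length : Int) 1 := by
  simp only [PySem.Dict.keys, dict_items]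
  simpa using PySem.List.map_fst_enumerate (pvAccs xs) (s := 0)

lemma dict_nodup (xs : List Int) : (pvDict xs).keys.Nodup := by
  rw [dict_keys]; exact PySem.List.nodup_pyRange_one _ _

lemma bget_neg (xs : List Int) : (pvDict xs).getD (-1) 0 = 0 := by
  apply PySem.Dict.getD_of_not_contains
  rw [PySem.Dict.contains_eq_decide_mem_keys, dict_keys]
  simp [PySem.List.mem_pyRange_one]

lemma bget_nat (xs : List Int) (k : Nat) (hk : k < xs.length) :
    (pvDict xs).getD (k : Int) 0 = pvPre (pvA xs) (k + 1) := by
  have hk' : k < (pvAccs xs).length := by rw [accs_len]; omega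
  have hmem := mem_enum (pvAccs xs) 0 k hk'
  rw [zero_add] at hmem
  have hv : (pvAccs xs)[k]'hk' = pvPre (pvA xs) (k + 1) := by
    simp [accs_eq]
  rw [← hv]
  apply PySem.Dict.getD_of_mem_items
  · rw [dict_items]; exact hmem
  · exact dict_nodup xs

lemma bgetQ (xs : List Int) (i : Int) (h1 : -1 ≤ i) (h2 : i < (xs.length : Int)) :
    (pvDict xs).getD i 0 = Qx xs i := by
  rcases eq_or_lt_of_le h1 with he | hlt
  · rw [← he, bget_neg]
    simp [Qx, pvPre]
  · have h0 : 0 ≤ i := by omega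
    have hk : i.toNat < xs.length := by omega
    have hb := bget_nat xs i.toNat hk
    rw [Int.toNat_of_nonneg h0] at hb
    rw [hb]
    unfold Qx
    congr 1
    omega

lemma mem_diffs (xs : List Int) (y : Int) :
    y ∈ pvDiffs xs ↔
      ∃ i j : Int, -1 ≤ i ∧ i < j ∧ j < (xs.length : Int) ∧ y = Qx xs j - Qx xs i := by
  unfold pvDiffs
  rw [PySem.List.foldl_append_eq_flatMap]
  simp only [List.nil_append, List.mem_flatMap, List.mem_map, PySem.List.mem_pyRange_one]
  constructor
  · rintro ⟨i, ⟨hi1, hi2⟩, j, ⟨hj1, hj2⟩, rfl⟩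
    refine ⟨i, j, hi1, by omega, hj2, ?_⟩
    rw [bgetQ xs j (by omega) hj2, bgetQ xs i hi1 hi2]
  · rintro ⟨i, j, hi1, hij, hjn, rfl⟩
    exact ⟨i, ⟨hi1, by omega⟩, j, ⟨by omega, hjn⟩,
      by rw [bgetQ xs j (by omega) hjn, bgetQ xs i hi1 (by omega)]⟩

lemma solveA_eq (xs : List Int) :
    solve_ xs = match PySem.List.max? (pvDiffs xs) (fun z => z) with
      | none => 0
      | some deltaS => if deltaS ≤ 0 then xs.sum - 1 else xs.sum + deltaS := rfl

-- B-side lemmas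
lemma altFold : ∀ (l : List Int) (t c b : Int),
    l.foldl pvStep (t, c, b) = (t + l.sum, (l.map pvF).foldl kstep (c, b)) := by
  intro l
  induction l with
  | nil => intro t c b; simp
  | cons y ys ih =>
    intro t c b
    simp only [List.foldl_cons, List.map_cons, List.sum_cons]
    have hstep : pvStep (t, c, b) y = (t + y, kstep (c, b) (pvF y)) := by
      simp [pvStep, kstep, pvF]
    rw [hstep, ih]
    refine Prod.ext ?_ rfl
    simp; ring

lemma alt_eq (x : Int) (rest : List Int) :
    solve__alt (x :: rest) =
      (if ((rest.map pvF).foldl kstep (pvF x, pvF x)).2 ≤ 0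
        then (x + rest.sum) - 1
        else (x + rest.sum) + ((rest.map pvF).foldl kstep (pvF x, pvF x)).2) := by
  simp only [solve__alt]
  rw [altFold]
  simp [pvF]

lemma step_end (p : List Int) (v c : Int) (h : EndB p c) :
    EndB (p ++ [v]) (if c < 0 then v else c + v) := by
  obtain ⟨⟨k, hk, hc⟩, hub⟩ := h
  have hsum : (p ++ [v]).sum = p.sum + v := by simp
  have hlen : (p ++ [v]).length = p.length + 1 := by simp
  constructor
  · by_cases h0 : c < 0
    · refine ⟨p.length, by omega, ?_⟩
      rw [if_pos h0, hsum, pvPre_append p [v] p.length le_rfl, pvPre_len]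
      ring
    · refine ⟨k, by omega, ?_⟩
      rw [if_neg h0, hsum, pvPre_append p [v] k (by omega)]
      omega
  · intro k' hk'
    rw [hlen] at hk'
    rw [hsum, pvPre_append p [v] k' (by omega)]
    by_cases hkL : k' = p.length
    · subst hkL
      rw [pvPre_len]
      split_ifs <;> omega
    · have hb := hub k' (by omega)
      split_ifs <;> omega

lemma step_seg (p : List Int) (v c' m : Int) (hE : EndB (p ++ [v]) c') (hS : SegB p m) :
    SegB (p ++ [v]) (if m < c' then c' else m) := by
  obtain ⟨⟨i, j, hij, hjle, hm⟩, hub⟩ := hS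
  obtain ⟨⟨k, hk, hc⟩, hub'⟩ := hE
  have hlen : (p ++ [v]).length = p.length + 1 := by simp
  have htop : pvPre (p ++ [v]) (p.length + 1) = (p ++ [v]).sum := by
    have := pvPre_len (p ++ [v])
    rwa [hlen] at this
  rw [hlen] at hk
  constructor
  · by_cases h0 : m < c'
    · refine ⟨k, p.length + 1, by omega, by omega, ?_⟩
      rw [if_pos h0, htop]
      exact hc
    · refine ⟨i, j, hij, by omega, ?_⟩
      rw [if_neg h0, pvPre_append p [v] j hjle, pvPre_append p [v] i (by omega)]
      exact hm
  · intro i' j' hij' hjle'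
    rw [hlen] at hjle'
    by_cases hjp : j' ≤ p.length
    · rw [pvPre_append p [v] j' hjp, pvPre_append p [v] i' (by omega)]
      have hb := hub i' j' hij' hjp
      split_ifs <;> omega
    · have hj' : j' = p.length + 1 := by omega
      subst hj'
      rw [htop]
      have hb := hub' i' (by rw [hlen]; omega)
      split_ifs <;> omega

lemma kadLoop : ∀ (rest p : List Int) (c m : Int), EndB p c → SegB p m →
    EndB (p ++ rest) ((rest.foldl kstep (c, m)).1) ∧
    SegB (p ++ rest) ((rest.foldl kstep (c, m)).2) := by
  intro rest
  induction rest with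
  | nil => intro p c m hE hS; simpa using ⟨hE, hS⟩
  | cons v t ih =>
    intro p c m hE hS
    have hE' := step_end p v c hE
    have hS' := step_seg p v _ m hE' hS
    have hks : kstep (c, m) v =
        (if c < 0 then v else c + v,
         if m < (if c < 0 then v else c + v) then (if c < 0 then v else c + v) else m) := rfl
    have hrec := ih (p ++ [v]) _ _ hE' hS'
    simp only [List.foldl_cons, hks]
    simpa [List.append_assoc] using hrec

lemma base_end (w : Int) : EndB [w] w := by
  constructor
  · exact ⟨0, by simp, by simp [pvPre]⟩
  · intro k hk
    have : k = 0 := by simpa using hk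
    subst this
    simp [pvPre]

lemma base_seg (w : Int) : SegB [w] w := by
  constructor
  · exact ⟨0, 1, by omega, by simp, by simp [pvPre]⟩
  · intro i j hij hjle
    simp only [List.length_singleton] at hjle
    have hi : i = 0 := by omega
    have hj : j = 1 := by omega
    subst hi; subst hj
    simp [pvPre]

-- ===== VERDICT (by name: the statement is the Claim_ definition above) =====
theorem solve__spec : Claim_equal_solve_ := by
  intro xs _ hpre
  unfold Spec_solve_
  cases xs with
  | nil => exact absurd rfl hpre
  | cons x rest =>
    rw [alt_eq, solveA_eq]
    have hxl : (x :: rest).length = rest.length + 1 := by simp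
    have hlenA : (pvA (x :: rest)).length = rest.length + 1 := by simp [pvA]
    have ha : [pvF x] ++ rest.map pvF = pvA (x :: rest) := rfl
    have hk := kadLoop (rest.map pvF) [pvF x] (pvF x) (pvF x) (base_end (pvF x)) (base_seg (pvF x))
    rw [ha] at hk
    obtain ⟨hE, hS⟩ := hk
    have hne : pvDiffs (x :: rest) ≠ [] := by
      intro hnil
      have hmem : Qx (x :: rest) 0 - Qx (x :: rest) (-1) ∈ pvDiffs (x :: rest) := by
        rw [mem_diffs]
        exact ⟨-1, 0, le_refl _, by omega, by rw [hxl]; omega, rfl⟩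
      rw [hnil] at hmem
      simp at hmem
    cases hmax : PySem.List.max? (pvDiffs (x :: rest)) (fun z => z) with
    | none =>
      exact absurd ((PySem.List.max?_eq_none_iff _ _).mp hmax) hne
    | some d =>
      have hdm : d ∈ pvDiffs (x :: rest) := PySem.List.max?_mem hmax
      have hdub : ∀ y ∈ pvDiffs (x :: rest), y ≤ d := by
        intro y hy
        exact PySem.List.max?_isMax hmax y hy
      have hd_le : d ≤ ((rest.map pvF).foldl kstep (pvF x, pvF x)).2 := by
        obtain ⟨i, j, hi, hij, hjn, hdq⟩ := (mem_diffs _ _).mp hdm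
        rw [hxl] at hjn
        have hb := hS.2 (i + 1).toNat (j + 1).toNat (by omega) (by rw [hlenA]; omega)
        rw [hdq]
        exact hb
      have hm_le : ((rest.map pvF).foldl kstep (pvF x, pvF x)).2 ≤ d := by
        obtain ⟨i0, j0, hij0, hle0, hm0⟩ := hS.1
        rw [hlenA] at hle0
        apply hdub
        rw [mem_diffs]
        refine ⟨(i0 : Int) - 1, (j0 : Int) - 1, by omega, by omega, by rw [hxl]; omega, ?_⟩
        have e1 : (((j0 : Int) - 1) + 1).toNat = j0 := by omega
        have e2 : (((i0 : Int) - 1) + 1).toNat = i0 := by omega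
        simp only [Qx, e1, e2]
        exact hm0
      have hdm' : d = ((rest.map pvF).foldl kstep (pvF x, pvF x)).2 := le_antisymm hd_le hm_le
      rw [hdm']
      simp
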